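-- pv_equiv track=rewrite | github.com/kaust-cs249-2020/reem-alghamdi | ch7/code/ch7_12.py | format_cycles
-- ===== SOURCE A (Python) =====
-- def format_cycles(all_edges):
--     """
--     given the edges (2, 4), (3, 6), (5, 1), (7, 9), (10, 12), (11, 8), split them to get two edges groups
--      (2, 4), (3, 6), (5, 1) and (7, 9), (10, 12), (11, 8) then into their cycles
--      1 2 3 4 6 5 and 8 7 9 10 12 11
--     """
--     split_edges_by_cycle = [[]]
--     for edge in all_edges:
--         if edge[0] > edge[1]:
--             split_edges_by_cycle[-1].append(edge[0])
--             split_edges_by_cycle[-1].insert(0, edge[1])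
--             split_edges_by_cycle.append([])
--         else:
--             split_edges_by_cycle[-1].extend(edge)
--     split_edges_by_cycle = split_edges_by_cycle[:-1]
--     return split_edges_by_cycle
-- ===== SOURCE B (Python) =====
-- def format_cycles(all_edges):
--     # pass 1: split edges into runs, each terminated by a closing edge (e0 > e1);
--     # a trailing unterminated run is dropped
--     groups = []
--     current = []
--     for edge in all_edges:
--         current.append(edge)
--         if edge[0] > edge[1]:
--             groups.append(current)
--             current = []
--     # pass 2: assemble each run's node list
--     result = []
--     for g in groups:
--         nodes = [g[-1][1]]
--         for e in g[:-1]: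
--             nodes.extend(e)
--         nodes.append(g[-1][0])
--         result.append(nodes)
--     return result
-- ===== Notes on version B (the rewrite author's own statement) =====
-- stated objective: alternative
-- what changed: B splits the work into two passes: first it groups the raw edges into runs terminated by a closing edge (dropping a trailing unterminated run), then a separate assembly pass builds each cycle's node list from its run; A instead mutates the last node-list in place while scanning and drops the trailing list at the end.
import Mathlib
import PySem

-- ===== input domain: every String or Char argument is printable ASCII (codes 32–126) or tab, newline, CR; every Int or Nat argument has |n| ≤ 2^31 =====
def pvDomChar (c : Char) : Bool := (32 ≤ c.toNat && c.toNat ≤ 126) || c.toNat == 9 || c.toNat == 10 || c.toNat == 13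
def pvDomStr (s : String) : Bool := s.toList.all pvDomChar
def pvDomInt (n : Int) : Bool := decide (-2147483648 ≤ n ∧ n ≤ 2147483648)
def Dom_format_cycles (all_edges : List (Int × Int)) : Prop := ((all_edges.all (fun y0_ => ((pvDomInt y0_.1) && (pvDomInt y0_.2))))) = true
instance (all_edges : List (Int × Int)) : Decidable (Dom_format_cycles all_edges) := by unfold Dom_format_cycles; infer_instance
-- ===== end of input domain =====

-- B replaces A's in-place mutation of the last node-list by two passes (group edges into runs, then assemble each run); equivalence of return values proved on all inputs.


-- ===== PORT A =====
-- apply f to the last element of the list (Python's `lst[-1] = …` mutation; the state is never empty here)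
def pvSetLast (f : List Int → List Int) : List (List Int) → List (List Int)
  | [] => []
  | [g] => [f g]
  | g :: rest => g :: pvSetLast f rest

def format_cycles (all_edges : List (Int × Int)) : List (List Int) :=
  (all_edges.foldl (fun s edge =>
      if edge.1 > edge.2 then
        -- append edge[0], then insert edge[1] at position 0, then start a fresh group
        (pvSetLast (fun g => edge.2 :: (g ++ [edge.1])) s) ++ [[]]
      else
        pvSetLast (fun g => g ++ [edge.1, edge.2]) s)
    [[]]).dropLast  -- split_edges_by_cycle[:-1]

-- ===== PORT B =====
-- pass-2 helper: nodes = [g[-1][1]]; extend with each edge of g[:-1]; append g[-1][0]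
def pvAssemble (g : List (Int × Int)) : List Int :=
  match g.getLast? with
  | none => []   -- unreachable: every run ends with its closing edge
  | some last => (g.dropLast.foldl (fun ns e => ns ++ [e.1, e.2]) [last.2]) ++ [last.1]

def format_cycles_alt (all_edges : List (Int × Int)) : List (List Int) :=
  let st := all_edges.foldl
    (fun (st : List (List (Int × Int)) × List (Int × Int)) edge =>
      let cur := st.2 ++ [edge]
      if edge.1 > edge.2 then (st.1 ++ [cur], []) else (st.1, cur))
    ([], [])
  st.1.foldl (fun res g => res ++ [pvAssemble g]) []

-- ===== PRECONDITION & SPEC =====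
def Spec_format_cycles (all_edges : List (Int × Int)) (out : List (List Int)) : Prop := out = format_cycles_alt all_edges
instance (all_edges : List (Int × Int)) (out : List (List Int)) : Decidable (Spec_format_cycles all_edges out) := by unfold Spec_format_cycles; infer_instance

-- ===== CLAIM (what is proved, stated in full; the proofs are below) =====
def Claim_equal_format_cycles : Prop := ∀ (all_edges : List (Int × Int)), Dom_format_cycles all_edges → Spec_format_cycles all_edges (format_cycles all_edges)

-- ===== LEMMAS AND PROOFS =====

-- flattened node list of the current (unfinished) run
def pvFlat (cur : List (Int × Int)) : List Int := cur.flatMap (fun e => [e.1, e.2])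

theorem pvSetLast_append_singleton (f : List Int → List Int) (done : List (List Int)) (g : List Int) :
    pvSetLast f (done ++ [g]) = done ++ [f g] := by
  induction done with
  | nil => rfl
  | cons d rest ih =>
      cases rest with
      | nil => simp [pvSetLast]
      | cons d' rest' => simpa [pvSetLast] using ih

theorem pvFlat_append (cur : List (Int × Int)) (e : Int × Int) :
    pvFlat (cur ++ [e]) = pvFlat cur ++ [e.1, e.2] := by
  simp [pvFlat]

theorem pvAssemble_append (cur : List (Int × Int)) (e : Int × Int) :
    pvAssemble (cur ++ [e]) = e.2 :: (pvFlat cur ++ [e.1]) := by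
  simp [pvAssemble, pvFlat, List.flatMap]

-- loop invariant: A's state is B's finished runs (assembled) plus the flattened current run
theorem pv_main (edges : List (Int × Int)) :
    ∀ (gs : List (List (Int × Int))) (cur : List (Int × Int)),
    edges.foldl (fun s edge =>
        if edge.1 > edge.2 then
          (pvSetLast (fun g => edge.2 :: (g ++ [edge.1])) s) ++ [[]]
        else
          pvSetLast (fun g => g ++ [edge.1, edge.2]) s)
      (gs.map pvAssemble ++ [pvFlat cur]) =
    (edges.foldl
        (fun (st : List (List (Int × Int)) × List (Int × Int)) edge =>
          let cur := st.2 ++ [edge]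
          if edge.1 > edge.2 then (st.1 ++ [cur], []) else (st.1, cur))
        (gs, cur)).1.map pvAssemble ++
      [pvFlat (edges.foldl
        (fun (st : List (List (Int × Int)) × List (Int × Int)) edge =>
          let cur := st.2 ++ [edge]
          if edge.1 > edge.2 then (st.1 ++ [cur], []) else (st.1, cur))
        (gs, cur)).2] := by
  induction edges with
  | nil => intro gs cur; rfl
  | cons e rest ih =>
      intro gs cur
      by_cases h : e.1 > e.2
      · have hA : pvSetLast (fun g => e.2 :: (g ++ [e.1])) (gs.map pvAssemble ++ [pvFlat cur]) ++ [[]]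
            = (gs ++ [cur ++ [e]]).map pvAssemble ++ [pvFlat []] := by
          rw [pvSetLast_append_singleton]
          simp [pvAssemble_append, pvFlat]
        simp only [List.foldl_cons, if_pos h, hA]
        exact ih (gs ++ [cur ++ [e]]) []
      · have hA : pvSetLast (fun g => g ++ [e.1, e.2]) (gs.map pvAssemble ++ [pvFlat cur])
            = gs.map pvAssemble ++ [pvFlat (cur ++ [e])] := by
          rw [pvSetLast_append_singleton, pvFlat_append]
        simp only [List.foldl_cons, if_neg h, hA]
        exact ih gs (cur ++ [e])

-- ===== VERDICT (by name: the statement is the Claim_ definition above) =====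
theorem format_cycles_spec : Claim_equal_format_cycles := by
  intro all_edges _
  unfold Spec_format_cycles format_cycles format_cycles_alt
  have h := pv_main all_edges [] []
  simp only [List.map_nil, List.nil_append] at h
  rw [show (pvFlat [] : List Int) = [] from rfl] at h
  rw [h, List.dropLast_concat, PySem.List.foldl_append_singleton_eq_map]
  simp
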